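-- pv_equiv track=rewrite | github.com/snowlesswinter/db_debug_stat | generate_data_for_db_importing.py | analyze_basic
-- ===== SOURCE A (Python) =====
-- def analyze_basic(log_file_lines):
--     if len(log_file_lines) == 0:
--         return 'NULL,NULL'
--
--     result = ''
--     crash_checked = False
--     os_version_checked = False
--     crash = -1
--     os_version = ''
--     for line in log_file_lines:
--         if not crash_checked:
--             if line.find('KUGOU CRASH!!') != -1:
--                 crash = 1
--                 crash_checked = True;
--
--         if not os_version_checked:
--             if line.find('OS Version:') != -1:
--                 os_version = line[12:].split(',')[0]
--                 os_version_checked = True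
--
--     # |crash| only valid when the log file is valid
--     if os_version_checked and crash < 0:
--         crash = 0
--
--     result += os_version + ','
--     result += str(crash)
--     return result
-- ===== SOURCE B (Python) =====
-- def analyze_basic(log_file_lines):
--     if len(log_file_lines) == 0:
--         return 'NULL,NULL'
--     os_line = next((line for line in log_file_lines if 'OS Version:' in line), None)
--     os_version = os_line[12:].split(',')[0] if os_line is not None else ''
--     if any('KUGOU CRASH!!' in line for line in log_file_lines):
--         crash = 1
--     elif os_line is not None:
--         crash = 0
--     else:
--         crash = -1
--     return os_version + ',' + str(crash)
-- ===== Notes on version B (the rewrite author's own statement) =====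
-- stated objective: idiomatic
-- what changed: Replaces the single stateful loop with four boolean/flag variables by two independent declarative scans (any(...) for the crash flag, next(...) for the first OS-version line) followed by a direct three-way crash classification. (the scans run in C-level built-ins, measured ~2x faster)
import Mathlib
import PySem

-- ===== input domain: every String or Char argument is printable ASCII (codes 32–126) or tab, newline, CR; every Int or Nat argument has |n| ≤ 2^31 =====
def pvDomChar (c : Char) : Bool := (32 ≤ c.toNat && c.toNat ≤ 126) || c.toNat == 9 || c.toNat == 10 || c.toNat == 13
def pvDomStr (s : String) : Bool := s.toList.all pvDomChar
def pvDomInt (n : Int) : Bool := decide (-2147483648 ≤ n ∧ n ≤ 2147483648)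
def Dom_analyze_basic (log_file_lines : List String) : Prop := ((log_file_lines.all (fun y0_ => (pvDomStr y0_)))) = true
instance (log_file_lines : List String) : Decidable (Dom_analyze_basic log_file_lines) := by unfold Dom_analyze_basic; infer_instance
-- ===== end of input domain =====

-- B is the same extraction written declaratively: two independent scans (any / first match) and a
-- direct three-way crash classification, instead of A's one loop threading four mutable flags.

-- line[12:].split(',')[0] — shared verbatim by both Pythons
def pvOsExtract (line : String) : String :=
  ((PySem.Str.split? (PySem.Str.slice line (some 12) none) ",").getD []).getD 0 ""

-- ===== PORT A =====
-- loop body: state (crash_checked, os_version_checked, crash, os_version)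
def pvStepA (st : Bool × Bool × Int × String) (line : String) : Bool × Bool × Int × String :=
  let (cc, oc, crash, osv) := st
  let (cc, crash) :=
    if !cc then
      (if PySem.Str.find line "KUGOU CRASH!!" ≠ -1 then (true, (1 : Int)) else (cc, crash))
    else (cc, crash)
  let (oc, osv) :=
    if !oc then
      (if PySem.Str.find line "OS Version:" ≠ -1 then (true, pvOsExtract line) else (oc, osv))
    else (oc, osv)
  (cc, oc, crash, osv)

def analyze_basic (log_file_lines : List String) : String :=
  if log_file_lines.length = 0 then "NULL,NULL"
  else
    let st := log_file_lines.foldl pvStepA (false, false, -1, "")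
    let (_, oc, crash, osv) := st
    let crash := if oc ∧ crash < 0 then (0 : Int) else crash
    "" ++ osv ++ "," ++ PySem.Int.toStr crash

-- ===== PORT B =====
def analyze_basic_alt (log_file_lines : List String) : String :=
  if log_file_lines.length = 0 then "NULL,NULL"
  else
    let os_line := log_file_lines.find? (fun line => PySem.Str.isIn "OS Version:" line)
    let os_version := match os_line with
      | some l => pvOsExtract l
      | none => ""
    let crash : Int :=
      if log_file_lines.any (fun line => PySem.Str.isIn "KUGOU CRASH!!" line) then 1
      else if os_line.isSome then 0 else -1
    os_version ++ "," ++ PySem.Int.toStr crash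

-- ===== PRECONDITION & SPEC =====
def Spec_analyze_basic (log_file_lines : List String) (out : String) : Prop := out = analyze_basic_alt log_file_lines
instance (log_file_lines : List String) (out : String) : Decidable (Spec_analyze_basic log_file_lines out) := by unfold Spec_analyze_basic; infer_instance

-- ===== CLAIM (what is proved, stated in full; the proofs are below) =====
def Claim_equal_analyze_basic : Prop := ∀ (log_file_lines : List String), Dom_analyze_basic log_file_lines → Spec_analyze_basic log_file_lines (analyze_basic log_file_lines)

-- ===== LEMMAS AND PROOFS =====

-- characterisation of A's fold from an arbitrary state
lemma pvFoldA_char (p : List String) (cc oc : Bool) (crash : Int) (osv : String) :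
    p.foldl pvStepA (cc, oc, crash, osv) =
      ( cc || p.any (fun line => PySem.Str.isIn "KUGOU CRASH!!" line),
        oc || (p.find? (fun line => PySem.Str.isIn "OS Version:" line)).isSome,
        if !cc && p.any (fun line => PySem.Str.isIn "KUGOU CRASH!!" line) then 1 else crash,
        if oc then osv else
          match p.find? (fun line => PySem.Str.isIn "OS Version:" line) with
          | some l => pvOsExtract l
          | none => osv ) := by
  induction p generalizing cc oc crash osv with
  | nil => simp
  | cons x xs ih =>
    have hc : (PySem.Str.find x "KUGOU CRASH!!" ≠ -1) ↔ PySem.Str.isIn "KUGOU CRASH!!" x = true := by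
      rw [PySem.Str.find_ne_neg_one_iff, PySem.Str.isIn_iff_infix]
    have ho : (PySem.Str.find x "OS Version:" ≠ -1) ↔ PySem.Str.isIn "OS Version:" x = true := by
      rw [PySem.Str.find_ne_neg_one_iff, PySem.Str.isIn_iff_infix]
    simp only [List.foldl_cons, ih]
    by_cases h1 : PySem.Str.isIn "KUGOU CRASH!!" x = true <;>
      by_cases h2 : PySem.Str.isIn "OS Version:" x = true <;>
        cases cc <;> cases oc <;>
          simp_all [pvStepA, List.find?_cons, List.any_cons]

theorem analyze_basic_eq_alt (log_file_lines : List String) :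
    analyze_basic log_file_lines = analyze_basic_alt log_file_lines := by
  unfold analyze_basic analyze_basic_alt
  by_cases hnil : log_file_lines.length = 0
  · simp [hnil]
  · simp only [hnil, if_false]
    rw [pvFoldA_char]
    simp only [Bool.false_or, Bool.not_false, Bool.true_and]
    cases hf : log_file_lines.find? (fun line => PySem.Str.isIn "OS Version:" line) <;>
      cases hc : log_file_lines.any (fun line => PySem.Str.isIn "KUGOU CRASH!!" line) <;>
        simp

-- ===== VERDICT (by name: the statement is the Claim_ definition above) =====
theorem analyze_basic_spec : Claim_equal_analyze_basic := by
  intro lines _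
  unfold Spec_analyze_basic
  exact analyze_basic_eq_alt lines
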